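-- pv_equiv track=rewrite | github.com/getsentry/sentry | src/sentry/replays/usecases/query/__init__.py | _make_ordered
-- ===== SOURCE A (Python) =====
-- from typing import Any, Literal, cast
--
-- def _make_ordered(replay_ids: list[str], results: Any) -> list[Any]:
--     if not replay_ids:
--         return []
--     elif not results:
--         return []
--
--     replay_id_to_index = {}
--     i = 0
--     for replay_id in replay_ids:
--         if replay_id not in replay_id_to_index:
--             replay_id_to_index[replay_id] = i
--             i += 1
--
--     ordered_results = [None] * len(replay_id_to_index)
--     for result in results:
--         index = replay_id_to_index[result["replay_id"]]
--         ordered_results[index] = result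
--
--     return list(filter(None, ordered_results))
-- ===== SOURCE B (Python) =====
-- def _make_ordered(replay_ids: list, results):
--     if not replay_ids:
--         return []
--     if not results:
--         return []
--
--     pos = {}
--     for rid in replay_ids:
--         if rid not in pos:
--             pos[rid] = len(pos)
--
--     mapping = {pos[r["replay_id"]]: r for r in results}
--     return [r for _, r in sorted(mapping.items(), key=lambda kv: kv[0])]
-- ===== Notes on version B (the rewrite author's own statement) =====
-- stated objective: alternative
-- what changed: Replaces A's scatter into a preallocated None-filled list followed by a filter(None) pass with a dict comprehension keyed by the first-occurrence index and a final sort of its items, so the output is collected by sorting a compact index->result mapping instead of filtering a sparse array.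
import Mathlib
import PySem

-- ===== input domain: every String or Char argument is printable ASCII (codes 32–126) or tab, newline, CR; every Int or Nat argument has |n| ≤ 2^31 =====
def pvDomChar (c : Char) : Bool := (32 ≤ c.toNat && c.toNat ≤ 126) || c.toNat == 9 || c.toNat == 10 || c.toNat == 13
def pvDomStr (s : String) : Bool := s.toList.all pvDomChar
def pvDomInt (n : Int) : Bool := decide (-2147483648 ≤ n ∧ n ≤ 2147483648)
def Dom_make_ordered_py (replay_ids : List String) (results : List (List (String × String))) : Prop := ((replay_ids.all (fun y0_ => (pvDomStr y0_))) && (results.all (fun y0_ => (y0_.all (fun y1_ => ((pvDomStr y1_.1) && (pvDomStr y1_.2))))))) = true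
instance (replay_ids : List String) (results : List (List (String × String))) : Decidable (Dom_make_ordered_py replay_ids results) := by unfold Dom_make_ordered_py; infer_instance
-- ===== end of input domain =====

-- B reorders by sorting a compact index->result dict instead of A's scatter into a None-filled list plus filter(None); return values agree on all non-raising inputs.

-- ===== PORT A =====
-- literal transliteration of A: first-occurrence index dict (explicit counter i),
-- scatter into a [None]*len(index) list, then filter(None, ...).
def make_ordered_py (replay_ids : List String) (results : List (List (String × String))) : List (List (String × String)) :=
  if replay_ids = [] then []
  else if results = [] then []
  else
    let st := replay_ids.foldl (fun (st : PySem.Dict String Int × Int) rid =>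
        if st.1.contains rid then st else (st.1.insert rid st.2, st.2 + 1))
      (PySem.Dict.empty, 0)
    let idx := st.1
    let init : List (Option (List (String × String))) := List.replicate idx.size none
    let ordered := results.foldl (fun arr r =>
        -- Python: ordered_results[index] = result; index = replay_id_to_index[result["replay_id"]].
        -- Both dict lookups raise KeyError exactly where Pre_ excludes; there the getD defaults are never used,
        -- and the stored index satisfies 0 ≤ index < len(arr), so .toNat and List.set are exact here.
        arr.set (PySem.Dict.getD idx (PySem.Dict.getD (PySem.Dict.mk r) "replay_id" "") 0).toNat (some r)) init
    ordered.filterMap (fun o => match o with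
      | some d => if d = [] then none else some d   -- filter(None, ...) keeps truthy entries
      | none => none)

-- ===== PORT B =====
-- literal transliteration of B: same guards, index dict via len(pos),
-- dict comprehension keyed by index (last result wins), then sorted items by key.
def make_ordered_py_alt (replay_ids : List String) (results : List (List (String × String))) : List (List (String × String)) :=
  if replay_ids = [] then []
  else if results = [] then []
  else
    let pos := replay_ids.foldl (fun (d : PySem.Dict String Int) rid =>
        if d.contains rid then d else d.insert rid (d.size : Int)) PySem.Dict.empty
    let mapping := results.foldl (fun (m : PySem.Dict Int (List (String × String))) r =>
        -- {pos[r["replay_id"]]: r for r in results}; KeyErrors are exactly Pre_'s exclusions (defaults unused there)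
        m.insert (PySem.Dict.getD pos (PySem.Dict.getD (PySem.Dict.mk r) "replay_id" "") 0) r) PySem.Dict.empty
    (PySem.List.sorted mapping.items (fun kv => kv.1) false).map (fun kv => kv.2)

-- ===== PRECONDITION & SPEC =====
-- Pre_ excludes exactly the inputs where A raises KeyError: when both lists are nonempty, every result
-- must have a "replay_id" key whose value occurs in replay_ids (B raises on the same inputs).
def Pre_make_ordered_py (replay_ids : List String) (results : List (List (String × String))) : Prop :=
  replay_ids = [] ∨ results = [] ∨
    ∀ r ∈ results, ∃ v ∈ replay_ids, (PySem.Dict.mk r).get? "replay_id" = some v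
instance (replay_ids : List String) (results : List (List (String × String))) : Decidable (Pre_make_ordered_py replay_ids results) := by unfold Pre_make_ordered_py; infer_instance
def pvWitness_make_ordered_py : List String × (List (List (String × String))) :=
  (["a", "b"], [[("replay_id", "b"), ("v", "1")], [("replay_id", "a")]])
def Spec_make_ordered_py (replay_ids : List String) (results : List (List (String × String))) (out : List (List (String × String))) : Prop := out = make_ordered_py_alt replay_ids results
instance (replay_ids : List String) (results : List (List (String × String))) (out : List (List (String × String))) : Decidable (Spec_make_ordered_py replay_ids results out) := by unfold Spec_make_ordered_py; infer_instance

-- ===== CLAIM (what is proved, stated in full; the proofs are below) =====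
def Claim_equal_make_ordered_py : Prop := ∀ (replay_ids : List String) (results : List (List (String × String))), Dom_make_ordered_py replay_ids results → Pre_make_ordered_py replay_ids results → Spec_make_ordered_py replay_ids results (make_ordered_py replay_ids results)

-- ===== LEMMAS AND PROOFS =====

def pvPos (replay_ids : List String) : PySem.Dict String Int :=
  replay_ids.foldl (fun (d : PySem.Dict String Int) rid =>
    if d.contains rid then d else d.insert rid (d.size : Int)) PySem.Dict.empty

theorem pvA_fold_general (ids : List String) : ∀ (d : PySem.Dict String Int),
    ids.foldl (fun (st : PySem.Dict String Int × Int) rid =>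
        if st.1.contains rid then st else (st.1.insert rid st.2, st.2 + 1))
      (d, (d.size : Int))
    = (ids.foldl (fun d rid => if d.contains rid then d else d.insert rid (d.size : Int)) d,
       ((ids.foldl (fun d rid => if d.contains rid then d else d.insert rid (d.size : Int)) d).size : Int)) := by
  induction ids with
  | nil => intro d; rfl
  | cons rid ids ih =>
    intro d
    simp only [List.foldl_cons]
    by_cases h : d.contains rid
    · simp [h, ih d]
    · simp only [h, Bool.false_eq_true, ite_false]
      have hs : ((d.insert rid (d.size : Int)).size : Int) = (d.size : Int) + 1 := by
        rw [PySem.Dict.size_insert]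
        simp [h]
      rw [← hs, ih]

theorem pvScatterLen {α : Type} (g : α → Nat) (rs : List α) (arr : List (Option α)) :
    (rs.foldr (fun r a => a.set (g r) (some r)) arr).length = arr.length := by
  induction rs with
  | nil => rfl
  | cons r rs ih => simp [List.foldr_cons, List.length_set, ih]

theorem pvScatter {α : Type} (g : α → Nat) (rs : List α) (arr : List (Option α)) (j : Nat)
    (hj : j < arr.length) :
    (rs.foldr (fun r a => a.set (g r) (some r)) arr)[j]? =
      match rs.find? (fun r => g r == j) with
      | some r => some (some r)
      | none => arr[j]? := by
  induction rs with
  | nil => rfl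
  | cons r rs ih =>
    simp only [List.foldr_cons, List.find?_cons]
    rw [List.getElem?_set]
    by_cases h : g r = j
    · simp [h, pvScatterLen, hj]
    · have : (g r == j) = false := by simp [h]
      simp only [this, if_neg h]
      exact ih

theorem pvMapGet {ν : Type} (f : ν → Int) (rs : List ν) : ∀ (m : PySem.Dict Int ν) (k : Int),
    (rs.foldl (fun m r => m.insert (f r) r) m).get? k =
      match rs.reverse.find? (fun r => f r == k) with
      | some r => some r
      | none => m.get? k := by
  induction rs with
  | nil => intro m k; rfl
  | cons r rs ih =>
    intro m k
    simp only [List.foldl_cons, List.reverse_cons, List.find?_append, ih]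
    cases hfind : rs.reverse.find? (fun r => f r = k) with
    | some r' => simp
    | none =>
      by_cases h : f r = k
      · simp [h]
      · have hb : (f r == k) = false := by simp [h]
        simp only [Option.none_or, List.find?_cons, List.find?_nil, hb]
        rw [PySem.Dict.get?_insert, if_neg (fun hh : k = f r => h hh.symm)]

theorem pvPos_contains (ids : List String) (v : String) (hv : v ∈ ids) :
    (pvPos ids).contains v = true := by
  have : ∀ (l : List String) (d : PySem.Dict String Int), (v ∈ l ∨ d.contains v = true) →
      (l.foldl (fun d rid => if d.contains rid then d else d.insert rid (d.size : Int)) d).contains v = true := by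
    intro l
    induction l with
    | nil => intro d h; simpa using h.resolve_left (by simp)
    | cons rid l ih =>
      intro d h
      simp only [List.foldl_cons]
      by_cases hc : d.contains rid
      · simp only [hc, ite_true]
        apply ih
        rcases h with h | h
        · rcases List.mem_cons.mp h with rfl | h
          · right; exact hc
          · left; exact h
        · right; exact h
      · simp only [hc, Bool.false_eq_true, ite_false]
        apply ih
        rcases h with h | h
        · rcases List.mem_cons.mp h with rfl | h
          · right; simp [PySem.Dict.contains_insert_self]
          · left; exact h
        · right; rw [PySem.Dict.contains_insert]; simp [h]
  exact this ids PySem.Dict.empty (Or.inl hv)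

theorem pvPos_range (ids : List String) (k : String) (v : Int)
    (h : (pvPos ids).get? k = some v) : 0 ≤ v ∧ v < ((pvPos ids).size : Int) := by
  have : ∀ (l : List String) (d : PySem.Dict String Int),
      (∀ k v, d.get? k = some v → 0 ≤ v ∧ v < (d.size : Int)) →
      (∀ k v, (l.foldl (fun d rid => if d.contains rid then d else d.insert rid (d.size : Int)) d).get? k = some v →
        0 ≤ v ∧ v < ((l.foldl (fun d rid => if d.contains rid then d else d.insert rid (d.size : Int)) d).size : Int)) := by
    intro l
    induction l with
    | nil => intro d h; exact h
    | cons rid l ih =>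
      intro d h
      simp only [List.foldl_cons]
      by_cases hc : d.contains rid
      · simpa [hc] using ih d h
      · simp only [hc, Bool.false_eq_true, ite_false]
        apply ih
        intro k' v' h'
        rw [PySem.Dict.get?_insert] at h'
        rw [PySem.Dict.size_insert]
        simp only [hc, Bool.false_eq_true, ite_false]
        by_cases hk : k' = rid
        · simp only [hk, ite_true] at h'
          have : v' = (d.size : Int) := by simpa using h'.symm
          subst this
          constructor
          · positivity
          · push_cast; omega
        · simp only [hk, ite_false] at h'
          have := h k' v' h'
          push_cast
          omega
  exact this ids PySem.Dict.empty (by intro k v h; simp [PySem.Dict.get?_empty] at h) k v h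

theorem pvFind?_congr {α : Type} (p q : α → Bool) (l : List α) (h : ∀ x ∈ l, p x = q x) :
    l.find? p = l.find? q := by
  induction l with
  | nil => rfl
  | cons x l ih =>
    simp only [List.find?_cons, h x (List.mem_cons_self ..)]
    cases q x
    · exact ih fun y hy => h y (List.mem_cons_of_mem _ hy)
    · rfl

theorem pvCore (n : Nat) (F : List (String × String) → Int)
    (results : List (List (String × String)))
    (hfact : ∀ r ∈ results, 0 ≤ F r ∧ F r < (n : Int) ∧ r ≠ []) :
    (results.reverse.foldr (fun r a => a.set (F r).toNat (some r))
        (List.replicate n (none : Option (List (String × String))))).filterMap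
      (fun o => match o with
        | some d => if d = [] then none else some d
        | none => none)
    = (PySem.List.sorted
        (results.foldl (fun (m : PySem.Dict Int (List (String × String))) r => m.insert (F r) r)
          PySem.Dict.empty).items (fun kv => kv.1) false).map (fun kv => kv.2) := by
  set φ : Nat → Option (List (String × String)) :=
    fun j => results.reverse.find? (fun r => F r == (j : Int)) with hφ
  have hφmem : ∀ j v, φ j = some v → v ∈ results ∧ F v = (j : Int) := by
    intro j v h
    exact ⟨List.mem_reverse.mp (List.mem_of_find?_eq_some h), by simpa using List.find?_some h⟩
  -- ===== A side =====
  have harr : (results.reverse.foldr (fun r a => a.set (F r).toNat (some r))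
        (List.replicate n (none : Option (List (String × String)))))
      = (List.range n).map (fun j => results.reverse.find? (fun r => (F r).toNat == j)) := by
    apply List.ext_getElem?
    intro i
    by_cases hi : i < n
    · rw [pvScatter _ _ _ _ (by simpa using hi)]
      cases hfind : results.reverse.find? (fun r => (F r).toNat == i) with
      | some r => simp [hfind, hi]
      | none => simp [hfind, hi]
    · rw [List.getElem?_eq_none (by rw [pvScatterLen]; simpa using Nat.le_of_not_lt hi),
        List.getElem?_eq_none (by simpa using Nat.le_of_not_lt hi)]
  rw [harr, List.filterMap_map]
  have hAside : (List.range n).filterMap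
        ((fun o => match o with
          | some d => if d = [] then none else some d
          | none => none) ∘ (fun j => results.reverse.find? (fun r => (F r).toNat == j)))
      = (List.range n).filterMap φ := by
    apply List.filterMap_congr
    intro j hj
    have hpred : ∀ r ∈ results.reverse, ((F r).toNat == j) = (F r == (j : Int)) := by
      intro r hr
      have h0 := (hfact r (List.mem_reverse.mp hr)).1
      by_cases hc : F r = (j : Int)
      · simp [hc]
      · have h1 : ¬ (F r).toNat = j := by omega
        simp [hc, h1]
    simp only [Function.comp]
    rw [pvFind?_congr _ _ _ hpred]
    cases hfind : results.reverse.find? (fun r => F r == (j : Int)) with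
    | none => simp [hφ, hfind]
    | some d =>
      have hd : d ≠ [] := (hfact d (hφmem j d (by rw [hφ]; exact hfind)).1).2.2
      simp [hφ, hfind, hd]
  rw [hAside]
  -- ===== B side =====
  set mapping := results.foldl
      (fun (m : PySem.Dict Int (List (String × String))) r => m.insert (F r) r)
      PySem.Dict.empty with hmap
  have hmapnodup : mapping.keys.Nodup :=
    PySem.Dict.nodup_keys_foldl_insert_key results F (fun _ r => r) PySem.Dict.empty
      PySem.Dict.nodup_keys_empty
  have hget : ∀ k, mapping.get? k =
      match results.reverse.find? (fun r => F r == k) with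
      | some r => some r
      | none => none := by
    intro k
    rw [hmap, pvMapGet]
    cases results.reverse.find? (fun r => F r == k) <;> simp [PySem.Dict.get?_empty]
  set T : List (Int × List (String × String)) :=
    (List.range n).filterMap (fun j => (φ j).map (fun r => ((j : Int), r))) with hT
  have hpair : T.Pairwise (fun a b => a.1 < b.1) := by
    rw [hT]
    refine List.pairwise_filterMap.mpr (List.pairwise_lt_range.imp ?_)
    intro a a' hlt b hb b' hb'
    obtain ⟨r, hr, rfl⟩ := Option.map_eq_some_iff.mp hb
    obtain ⟨r', hr', rfl⟩ := Option.map_eq_some_iff.mp hb'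
    show ((a : Int)) < ((a' : Int))
    exact_mod_cast hlt
  have hTnodup : T.Nodup := hpair.imp fun {a b} h heq => absurd (heq ▸ h) (lt_irrefl _)
  have hitemsnodup : mapping.items.Nodup := List.Nodup.of_map Prod.fst hmapnodup
  have hperm : T.Perm mapping.items := by
    refine (List.perm_ext_iff_of_nodup hTnodup hitemsnodup).mpr ?_
    rintro ⟨k, v⟩
    rw [hT]
    constructor
    · intro hmem
      obtain ⟨j, hj, hjeq⟩ := List.mem_filterMap.mp hmem
      obtain ⟨r, hr, heq⟩ := Option.map_eq_some_iff.mp hjeq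
      have hk : (j : Int) = k := congrArg Prod.fst heq
      have hv : r = v := congrArg Prod.snd heq
      apply (PySem.Dict.get?_eq_some_iff_mem_items mapping k v hmapnodup).mp
      rw [hget k, ← hk]
      rw [hφ] at hr
      simp only at hr
      rw [hr, hv]
    · intro hmem
      have hsome := (PySem.Dict.get?_eq_some_iff_mem_items mapping k v hmapnodup).mpr hmem
      rw [hget k] at hsome
      cases hfind : results.reverse.find? (fun r => F r == k) with
      | none => rw [hfind] at hsome; simp at hsome
      | some r =>
        rw [hfind] at hsome
        have hv : r = v := by simpa using hsome
        subst hv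
        have hrmem : r ∈ results := List.mem_reverse.mp (List.mem_of_find?_eq_some hfind)
        have hr0 := (hfact r hrmem).1
        have hrn := (hfact r hrmem).2.1
        have hFr : F r = k := by simpa using List.find?_some hfind
        refine List.mem_filterMap.mpr ⟨k.toNat, List.mem_range.mpr (by omega), ?_⟩
        have hcast : ((k.toNat : Int)) = k := Int.toNat_of_nonneg (by omega)
        rw [hφ]
        simp only [hcast]
        rw [hfind]
        simp
  have hsorted : PySem.List.sorted mapping.items (fun kv => kv.1) = T :=
    PySem.List.sorted_eq_of_perm_of_pairwise_lt _ _ _ hperm hpair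
  rw [hsorted, hT, List.map_filterMap]
  apply List.filterMap_congr
  intro j hj
  cases hφj : φ j <;> simp

theorem pvMain (ids : List String) (results : List (List (String × String)))
    (hids : ids ≠ []) (hres : results ≠ [])
    (hpre : ∀ r ∈ results, ∃ v ∈ ids, (PySem.Dict.mk r).get? "replay_id" = some v) :
    make_ordered_py ids results = make_ordered_py_alt ids results := by
  have hfold := pvA_fold_general ids PySem.Dict.empty
  have hfold0 : (PySem.Dict.empty : PySem.Dict String Int).size = 0 := rfl
  have hfact : ∀ r ∈ results,
      0 ≤ (pvPos ids).getD (PySem.Dict.getD (PySem.Dict.mk r) "replay_id" "") 0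
      ∧ (pvPos ids).getD (PySem.Dict.getD (PySem.Dict.mk r) "replay_id" "") 0 < ((pvPos ids).size : Int)
      ∧ r ≠ [] := by
    intro r hr
    obtain ⟨v, hv, hget⟩ := hpre r hr
    have hkey : PySem.Dict.getD (PySem.Dict.mk r) "replay_id" "" = v :=
      PySem.Dict.getD_of_get?_eq_some _ _ hget
    have hc : (pvPos ids).contains v = true := pvPos_contains ids v hv
    rw [PySem.Dict.contains_eq_isSome_get?] at hc
    obtain ⟨w, hw⟩ := Option.isSome_iff_exists.mp hc
    have hFw : (pvPos ids).getD (PySem.Dict.getD (PySem.Dict.mk r) "replay_id" "") 0 = w := by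
      rw [hkey]
      exact PySem.Dict.getD_of_get?_eq_some _ _ hw
    have hrange := pvPos_range ids v w hw
    refine ⟨by rw [hFw]; exact hrange.1, by rw [hFw]; exact hrange.2, ?_⟩
    intro hnil
    subst hnil
    exact (by simp [PySem.Dict.get?] at hget : False)
  simp only [make_ordered_py, make_ordered_py_alt, if_neg hids, if_neg hres]
  rw [show ((PySem.Dict.empty : PySem.Dict String Int), (0 : Int))
        = ((PySem.Dict.empty : PySem.Dict String Int), ((PySem.Dict.empty : PySem.Dict String Int).size : Int)) by
      simp [hfold0], hfold]
  rw [List.foldl_eq_foldr_reverse]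
  exact pvCore _ (fun r => (pvPos ids).getD (PySem.Dict.getD (PySem.Dict.mk r) "replay_id" "") 0)
    results hfact

-- ===== VERDICT (by name: the statement is the Claim_ definition above) =====
theorem make_ordered_py_spec : Claim_equal_make_ordered_py := by
  intro ids results _ hpre
  unfold Spec_make_ordered_py
  by_cases hids : ids = []
  · subst hids; simp [make_ordered_py, make_ordered_py_alt]
  by_cases hres : results = []
  · subst hres; simp [make_ordered_py, make_ordered_py_alt, hids]
  have h := (hpre.resolve_left hids).resolve_left hres
  exact pvMain ids results hids hres h
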